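-- pv_equiv track=rewrite | github.com/meta-pytorch/BackendBench | generated_kernels/std/std_implementation_v1.py | _normalize_dims
-- ===== SOURCE A (Python) =====
-- def _normalize_dims(dim, ndim):
--     """Normalize dim argument to a sorted list of unique, positive dims."""
--     if dim is None:
--         dims = list(range(ndim))
--     elif isinstance(dim, int):
--         dims = [dim]
--     else:
--         dims = list(dim)
--     # Normalize negatives and deduplicate
--     norm = []
--     seen = set()
--     for d in dims:
--         if d < 0:
--             d += ndim
--         if d < 0 or d >= ndim:
--             raise ValueError(f"dim {d} out of range for tensor with {ndim} dims")
--         if d not in seen: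
--             norm.append(d)
--             seen.add(d)
--     # Sort to keep original order of dimensions as in the tensor layout
--     norm.sort()
--     return norm
-- ===== SOURCE B (Python) =====
-- def _merge(a, b):
--     """Merge two sorted unique lists into one sorted list, dropping duplicates as they meet."""
--     out = []
--     i = j = 0
--     la, lb = len(a), len(b)
--     while i < la and j < lb:
--         x, y = a[i], b[j]
--         if x < y:
--             out.append(x); i += 1
--         elif y < x:
--             out.append(y); j += 1
--         else:
--             out.append(x); i += 1; j += 1
--     out.extend(a[i:])
--     out.extend(b[j:])
--     return out
--
-- def _msort(l):
--     """Merge sort that eliminates duplicates inside the merges."""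
--     if len(l) <= 1:
--         return l
--     m = len(l) // 2
--     return _merge(_msort(l[:m]), _msort(l[m:]))
--
-- def _normalize_dims(dim, ndim):
--     """Normalize dim argument to a sorted list of unique, positive dims."""
--     if dim is None:
--         dims = list(range(ndim))
--     elif isinstance(dim, int):
--         dims = [dim]
--     else:
--         dims = list(dim)
--     norm = []
--     for d in dims:
--         if d < 0:
--             d += ndim
--         if d < 0 or d >= ndim:
--             raise ValueError(f"dim {d} out of range for tensor with {ndim} dims")
--         norm.append(d)
--     return _msort(norm)
-- ===== Notes on version B (the rewrite author's own statement) =====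
-- stated objective: alternative
-- what changed: B drops A's seen-set and builtin sort entirely: it only validates/normalizes the dims in one pass, then runs a hand-written recursive merge sort whose merge step eliminates duplicates when equal elements meet, so dedup happens inside the sort instead of A's set-dedup followed by list.sort().
import Mathlib
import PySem

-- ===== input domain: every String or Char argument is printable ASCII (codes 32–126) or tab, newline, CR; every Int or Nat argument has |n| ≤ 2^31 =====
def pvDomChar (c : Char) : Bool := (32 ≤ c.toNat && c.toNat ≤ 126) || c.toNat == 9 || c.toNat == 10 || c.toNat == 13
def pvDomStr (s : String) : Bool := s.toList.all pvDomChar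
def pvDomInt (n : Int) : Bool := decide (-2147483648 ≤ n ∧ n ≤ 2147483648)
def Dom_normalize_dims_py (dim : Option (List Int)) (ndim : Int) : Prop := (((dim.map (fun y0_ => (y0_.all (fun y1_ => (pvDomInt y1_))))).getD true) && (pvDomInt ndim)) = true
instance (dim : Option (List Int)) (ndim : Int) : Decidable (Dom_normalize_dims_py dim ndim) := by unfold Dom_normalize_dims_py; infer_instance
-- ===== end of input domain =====

-- B drops A's seen-set and builtin sort: it only validates/normalizes in one pass, then a
-- hand-written merge sort whose merge step drops duplicates when equal elements meet.

-- ===== PORT A =====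
def normalize_dims_py (dim : Option (List Int)) (ndim : Int) : List Int :=
  let dims : List Int := match dim with
    | none => PySem.List.pyRange 0 ndim 1
    | some l => l
  let st := dims.foldl (fun (st : List Int × PySem.Set Int) d =>
      let d := if d < 0 then d + ndim else d
      if d < 0 ∨ ndim ≤ d then st   -- Python: raise ValueError; inputs reaching this are excluded by Pre_
      else if d ∈ st.2 then st
      else (st.1 ++ [d], st.2.add d)) ([], ([] : PySem.Set Int))
  PySem.List.sorted st.1 (fun x => x) false

-- ===== PORT B =====
-- Source B's _merge: two-pointer while loop, equal heads emitted once (recursion renders the loop)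
def pvMerge : List Int → List Int → List Int
  | [], b => b
  | a, [] => a
  | x :: a, y :: b =>
    if x < y then x :: pvMerge a (y :: b)
    else if y < x then y :: pvMerge (x :: a) b
    else x :: pvMerge a b
termination_by a b => a.length + b.length

-- Source B's _msort: split at len//2, sort the halves, merge
def pvMsort (l : List Int) : List Int :=
  if l.length ≤ 1 then l
  else pvMerge (pvMsort (l.take (l.length / 2))) (pvMsort (l.drop (l.length / 2)))
termination_by l.length
decreasing_by
  · simp; omega
  · simp; omega

def normalize_dims_py_alt (dim : Option (List Int)) (ndim : Int) : List Int :=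
  let dims : List Int := match dim with
    | none => PySem.List.pyRange 0 ndim 1
    | some l => l
  let norm := dims.foldl (fun (norm : List Int) d =>
      let d := if d < 0 then d + ndim else d
      if d < 0 ∨ ndim ≤ d then norm   -- Python: raise ValueError; inputs reaching this are excluded by Pre_
      else norm ++ [d]) []
  pvMsort norm

-- ===== PRECONDITION & SPEC =====
-- Pre_ excludes exactly the inputs on which A raises ValueError: an explicit dim outside [-ndim, ndim).
def Pre_normalize_dims_py (dim : Option (List Int)) (ndim : Int) : Prop :=
  ∀ d ∈ dim.getD [], -ndim ≤ d ∧ d < ndim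
instance (dim : Option (List Int)) (ndim : Int) : Decidable (Pre_normalize_dims_py dim ndim) := by unfold Pre_normalize_dims_py; infer_instance
def pvWitness_normalize_dims_py : Option (List Int) × Int := (some [2, -1, 0, 2], 3)
def Spec_normalize_dims_py (dim : Option (List Int)) (ndim : Int) (out : List Int) : Prop := out = normalize_dims_py_alt dim ndim
instance (dim : Option (List Int)) (ndim : Int) (out : List Int) : Decidable (Spec_normalize_dims_py dim ndim out) := by unfold Spec_normalize_dims_py; infer_instance

-- ===== CLAIM (what is proved, stated in full; the proofs are below) =====
def Claim_equal_normalize_dims_py : Prop := ∀ (dim : Option (List Int)) (ndim : Int), Dom_normalize_dims_py dim ndim → Pre_normalize_dims_py dim ndim → Spec_normalize_dims_py dim ndim (normalize_dims_py dim ndim)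

-- ===== LEMMAS AND PROOFS =====

-- normalized value of one dim
def pvNorm (ndim d : Int) : Int := if d < 0 then d + ndim else d

lemma pvNorm_valid {ndim d : Int} (h : -ndim ≤ d ∧ d < ndim) :
    0 ≤ pvNorm ndim d ∧ pvNorm ndim d < ndim := by
  unfold pvNorm; split_ifs <;> omega

-- A's loop: membership of norm is membership of the normalized dims, and norm is nodup.
lemma loopA_char (ndim : Int) (dims : List Int)
    (hv : ∀ d ∈ dims, -ndim ≤ d ∧ d < ndim) :
    ∀ (norm : List Int) (seen : PySem.Set Int),
    (∀ x, x ∈ seen ↔ x ∈ norm) → norm.Nodup →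
    let st := dims.foldl (fun (st : List Int × PySem.Set Int) d =>
      let d := if d < 0 then d + ndim else d
      if d < 0 ∨ ndim ≤ d then st
      else if d ∈ st.2 then st
      else (st.1 ++ [d], st.2.add d)) (norm, seen)
    (∀ x, x ∈ st.1 ↔ x ∈ norm ∨ x ∈ dims.map (pvNorm ndim)) ∧ st.1.Nodup := by
  induction dims with
  | nil => intro norm seen hs hn; exact ⟨fun x => by simp, hn⟩
  | cons d ds ih =>
    intro norm seen hs hn
    have hd := pvNorm_valid (hv d (by simp))
    have hv' : ∀ d ∈ ds, -ndim ≤ d ∧ d < ndim := fun d hd => hv d (by simp [hd])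
    simp only [List.foldl_cons]
    have hrange : ¬ ((if d < 0 then d + ndim else d) < 0 ∨ ndim ≤ (if d < 0 then d + ndim else d)) := by
      unfold pvNorm at hd; omega
    rw [if_neg hrange]
    by_cases hmem : (if d < 0 then d + ndim else d) ∈ seen
    · rw [if_pos hmem]
      have h := ih hv' norm seen hs hn
      constructor
      · intro x
        rw [h.1 x]
        constructor
        · rintro (h1 | h1) <;> simp [h1, pvNorm]
        · rintro (h1 | h1)
          · exact Or.inl h1
          · simp only [List.map_cons, List.mem_cons] at h1
            rcases h1 with h1 | h1
            · left; rw [← hs]; rw [h1]; exact hmem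
            · right; simpa using h1
      · exact h.2
    · rw [if_neg hmem]
      have hs' : ∀ x, x ∈ seen.add (if d < 0 then d + ndim else d) ↔ x ∈ norm ++ [if d < 0 then d + ndim else d] := by
        intro x
        simp [PySem.Set.mem_add, hs x, or_comm]
      have hnotin : (if d < 0 then d + ndim else d) ∉ norm := fun hxa => hmem ((hs _).mpr hxa)
      have hn' : (norm ++ [if d < 0 then d + ndim else d]).Nodup := by
        refine List.Nodup.append hn (List.nodup_singleton _) ?_
        intro a ha hb
        simp only [List.mem_singleton] at hb
        exact hnotin (hb ▸ ha)
      have h := ih hv' (norm ++ [if d < 0 then d + ndim else d]) _ hs' hn'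
      refine ⟨fun x => ?_, h.2⟩
      rw [h.1 x]
      simp only [List.mem_append, List.map_cons, List.mem_cons, pvNorm]
      tauto

-- B's validation loop just normalizes every (valid) dim, in order.
lemma loopB_norm (ndim : Int) (dims : List Int)
    (hv : ∀ d ∈ dims, -ndim ≤ d ∧ d < ndim) :
    ∀ (acc : List Int),
    dims.foldl (fun (norm : List Int) d =>
      let d := if d < 0 then d + ndim else d
      if d < 0 ∨ ndim ≤ d then norm
      else norm ++ [d]) acc = acc ++ dims.map (pvNorm ndim) := by
  induction dims with
  | nil => intro acc; simp
  | cons d ds ih =>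
    intro acc
    have hd := pvNorm_valid (hv d (by simp))
    have hv' : ∀ d ∈ ds, -ndim ≤ d ∧ d < ndim := fun d hd => hv d (by simp [hd])
    simp only [List.foldl_cons, List.map_cons]
    rw [if_neg (by unfold pvNorm at hd; omega), ih hv', List.append_assoc]
    rfl

-- the deduplicating merge of two strictly increasing lists is strictly increasing
-- and holds exactly the union of their members
lemma merge_char (a b : List Int) (ha : a.Pairwise (· < ·)) (hb : b.Pairwise (· < ·)) :
    (pvMerge a b).Pairwise (· < ·) ∧ (∀ x, x ∈ pvMerge a b ↔ x ∈ a ∨ x ∈ b) := by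
  induction a, b using pvMerge.induct with
  | case1 b => simpa [pvMerge] using hb
  | case2 a h => cases a with
    | nil => simp at h
    | cons x t => simpa [pvMerge] using ha
  | case3 x a y b hlt ih =>
    rw [List.pairwise_cons] at ha
    have h := ih ha.2 hb
    constructor
    · rw [pvMerge, if_pos hlt, List.pairwise_cons]
      refine ⟨fun z hz => ?_, h.1⟩
      rcases (h.2 z).mp hz with hz | hz
      · exact ha.1 z hz
      · rw [List.pairwise_cons] at hb
        rcases List.mem_cons.mp hz with rfl | hz
        · exact hlt
        · have := hb.1 z hz; omega
    · intro z
      rw [pvMerge, if_pos hlt]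
      simp only [List.mem_cons, h.2 z, List.mem_cons]
      tauto
  | case4 x a y b hnlt hlt ih =>
    rw [List.pairwise_cons] at hb
    have h := ih ha hb.2
    constructor
    · rw [pvMerge, if_neg hnlt, if_pos hlt, List.pairwise_cons]
      refine ⟨fun z hz => ?_, h.1⟩
      rcases (h.2 z).mp hz with hz | hz
      · rw [List.pairwise_cons] at ha
        rcases List.mem_cons.mp hz with rfl | hz
        · exact hlt
        · have := ha.1 z hz; omega
      · exact hb.1 z hz
    · intro z
      rw [pvMerge, if_neg hnlt, if_pos hlt]
      simp only [List.mem_cons, h.2 z, List.mem_cons]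
      tauto
  | case5 x a y b hnlt hnlt' ih =>
    have hxy : x = y := by omega
    subst hxy
    rw [List.pairwise_cons] at ha
    rw [List.pairwise_cons] at hb
    have h := ih ha.2 hb.2
    constructor
    · rw [pvMerge, if_neg hnlt, if_neg hnlt', List.pairwise_cons]
      refine ⟨fun z hz => ?_, h.1⟩
      rcases (h.2 z).mp hz with hz | hz
      · exact ha.1 z hz
      · exact hb.1 z hz
    · intro z
      rw [pvMerge, if_neg hnlt, if_neg hnlt']
      simp only [List.mem_cons, h.2 z]
      tauto

-- the merge sort returns a strictly increasing list with the input's members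
lemma msort_char (l : List Int) :
    (pvMsort l).Pairwise (· < ·) ∧ (∀ x, x ∈ pvMsort l ↔ x ∈ l) := by
  induction l using pvMsort.induct with
  | case1 l hlen =>
    rw [pvMsort, if_pos hlen]
    refine ⟨?_, fun x => Iff.rfl⟩
    match l, hlen with
    | [], _ => exact List.Pairwise.nil
    | [x], _ => simp
  | case2 l hlen ih1 ih2 =>
    rw [pvMsort, if_neg hlen]
    have h := merge_char _ _ ih1.1 ih2.1
    refine ⟨h.1, fun x => ?_⟩
    rw [h.2 x, ih1.2 x, ih2.2 x, ← List.mem_append, List.take_append_drop]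

-- main equivalence for a validated dims list
lemma main_eq (ndim : Int) (dims : List Int)
    (hv : ∀ d ∈ dims, -ndim ≤ d ∧ d < ndim) :
    PySem.List.sorted
      (dims.foldl (fun (st : List Int × PySem.Set Int) d =>
        let d := if d < 0 then d + ndim else d
        if d < 0 ∨ ndim ≤ d then st
        else if d ∈ st.2 then st
        else (st.1 ++ [d], st.2.add d)) ([], ([] : PySem.Set Int))).1
      (fun x => x) false
    = pvMsort (dims.foldl (fun (norm : List Int) d =>
        let d := if d < 0 then d + ndim else d
        if d < 0 ∨ ndim ≤ d then norm
        else norm ++ [d]) []) := by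
  have hA := loopA_char ndim dims hv [] ([] : PySem.Set Int) (fun x => by simp) (by simp)
  rw [loopB_norm ndim dims hv [], List.nil_append]
  have hB := msort_char (dims.map (pvNorm ndim))
  refine PySem.List.sorted_eq_of_perm_of_pairwise_lt _ _ _ ?_ ?_
  · refine (List.perm_ext_iff_of_nodup hB.1.nodup hA.2).mpr (fun x => ?_)
    rw [hA.1 x, hB.2 x]
    simp
  · simpa using hB.1

-- ===== VERDICT (by name: the statement is the Claim_ definition above) =====
theorem normalize_dims_py_spec : Claim_equal_normalize_dims_py := by
  intro dim ndim _ hpre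
  unfold Spec_normalize_dims_py normalize_dims_py normalize_dims_py_alt
  cases dim with
  | none =>
    exact main_eq ndim _ (fun d hd => by rw [PySem.List.mem_pyRange_one] at hd; omega)
  | some l =>
    exact main_eq ndim l (fun d hd => hpre d hd)
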